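-- pv_equiv track=rewrite | github.com/Ajinkgupta/FooBar-challenge | level-2/Gearing Up for Destruction/Solution.py | solution
-- ===== SOURCE A (Python) =====
-- FALSE = [-1, -1]
--
-- def solution(pegs):
--     sum = 0
--     total_distance = pegs[-1] - pegs[0]
--     for i in range(2, len(pegs), 2):
--         sum += pegs[i] - pegs[i - 1]
--     sum *= 2
--     rn = total_distance - sum
--     numerator = rn * 2
--     denominator = 1 if len(pegs) % 2 == 1 else 3
--     return FALSE if numerator < denominator else verify(pegs, [numerator, denominator])
--
-- def verify(pegs, ret):
--     numerator = ret[0]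
--     for i in range(len(pegs) - 1):
--         distance = (pegs[i + 1] - pegs[i]) * ret[1]
--         next_numerator = distance - numerator
--         if numerator < ret[1]:
--             return FALSE
--         numerator = next_numerator
--     return [ret[0] // ret[1], 1] if ret[0] % ret[1] == 0 else ret
-- ===== SOURCE B (Python) =====
-- FALSE = [-1, -1]
--
-- def solution(pegs):
--     # B: precompute the alternating prefix sums of the gaps once, then validate
--     # each radius by a closed-form per-index formula instead of propagating a
--     # next_numerator recurrence through the pegs.
--     n = len(pegs)
--     alts = [0]
--     acc = 0
--     for j in range(n - 1):
--         g = pegs[j + 1] - pegs[j]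
--         acc += g if j % 2 == 0 else -g
--         alts.append(acc)
--     den = 1 if n % 2 == 1 else 3
--     num = 2 * acc
--     if num < den:
--         return FALSE
--     # radius i scaled by den equals (-1)**i * (num - den*alts[i]); A validates radii 0..n-2
--     if any((num - den * alts[i] if i % 2 == 0 else den * alts[i] - num) < den
--            for i in range(n - 1)):
--         return FALSE
--     return [num // den, 1] if num % den == 0 else [num, den]
-- ===== Notes on version B (the rewrite author's own statement) =====
-- stated objective: alternative
-- what changed: B tabulates the alternating prefix sums of the gaps once and validates each radius with the closed-form per-index test (-1)^i*(num - den*alts[i]) >= den, replacing A's even-index partial-sum-plus-total-distance arithmetic and the sequential next_numerator propagation inside its verify helper.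
import Mathlib
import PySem

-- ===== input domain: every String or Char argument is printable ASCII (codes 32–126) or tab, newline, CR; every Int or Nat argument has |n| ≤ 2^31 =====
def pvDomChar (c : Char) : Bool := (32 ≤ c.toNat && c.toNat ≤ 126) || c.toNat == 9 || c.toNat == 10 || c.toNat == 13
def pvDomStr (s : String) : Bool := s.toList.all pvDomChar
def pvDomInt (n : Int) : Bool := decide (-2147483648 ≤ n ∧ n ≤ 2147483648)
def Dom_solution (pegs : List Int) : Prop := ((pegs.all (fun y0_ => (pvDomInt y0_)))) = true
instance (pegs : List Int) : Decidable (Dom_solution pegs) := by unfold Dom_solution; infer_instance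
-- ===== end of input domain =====

-- B precomputes the alternating prefix sums of the gaps once and validates each radius by a
-- closed-form per-index formula, replacing A's even-index partial sum and its sequential
-- next_numerator propagation in verify; objective: alternative decomposition, same O(n) cost.

-- ===== PORT A =====
def pvFALSE : List Int := [-1, -1]

-- helper 'verify' of A; ret[0]/ret[1] and pegs[i]/pegs[i+1] are always in range at the
-- call sites reached under Pre_, so pyGetD with default 0 is exact there
def verify (pegs : List Int) (ret : List Int) : List Int :=
  let r0 := PySem.List.pyGetD ret 0 0
  let r1 := PySem.List.pyGetD ret 1 0
  let res := (PySem.List.pyRange 0 ((pegs.length : Int) - 1) 1).foldl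
    (fun st i => match st with
      | Except.error r => Except.error r
      | Except.ok numerator =>
        let distance := (PySem.List.pyGetD pegs (i + 1) 0 - PySem.List.pyGetD pegs i 0) * r1
        let next_numerator := distance - numerator
        if numerator < r1 then Except.error pvFALSE else Except.ok next_numerator)
    (Except.ok r0)
  match res with
  | Except.error r => r
  | Except.ok _ =>
      if PySem.Int.mod r0 r1 == 0 then [PySem.Int.floordiv r0 r1, 1] else ret

def solution (pegs : List Int) : List Int :=
  let total_distance := PySem.List.pyGetD pegs (-1) 0 - PySem.List.pyGetD pegs 0 0
  let s := (PySem.List.pyRange 2 (pegs.length : Int) 2).foldl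
    (fun s i => s + (PySem.List.pyGetD pegs i 0 - PySem.List.pyGetD pegs (i - 1) 0)) 0
  let s2 := s * 2
  let rn := total_distance - s2
  let numerator := rn * 2
  let denominator : Int := if pegs.length % 2 == 1 then 1 else 3
  if numerator < denominator then pvFALSE else verify pegs [numerator, denominator]

-- ===== PORT B =====
def solution_alt (pegs : List Int) : List Int :=
  let n := (pegs.length : Int)
  let st := (PySem.List.pyRange 0 (n - 1) 1).foldl
    (fun (p : List Int × Int) j =>
      let g := PySem.List.pyGetD pegs (j + 1) 0 - PySem.List.pyGetD pegs j 0
      let acc := p.2 + (if PySem.Int.mod j 2 == 0 then g else -g)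
      (p.1 ++ [acc], acc)) ([0], 0)
  let alts := st.1
  let den : Int := if pegs.length % 2 == 1 then 1 else 3
  let num := 2 * st.2
  if num < den then [-1, -1]
  else if (PySem.List.pyRange 0 (n - 1) 1).any
      (fun i => decide ((if PySem.Int.mod i 2 == 0
          then num - den * PySem.List.pyGetD alts i 0
          else den * PySem.List.pyGetD alts i 0 - num) < den))
    then [-1, -1]
  else if PySem.Int.mod num den == 0 then [PySem.Int.floordiv num den, 1] else [num, den]

-- ===== PRECONDITION & SPEC =====
-- Pre_ excludes only the empty list, on which A raises IndexError (pegs[-1]).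
def Pre_solution (pegs : List Int) : Prop := pegs ≠ []
instance (pegs : List Int) : Decidable (Pre_solution pegs) := by unfold Pre_solution; infer_instance
def pvWitness_solution : List Int := ([4, 30, 50] : List Int)

def Spec_solution (pegs : List Int) (out : List Int) : Prop := out = solution_alt pegs
instance (pegs : List Int) (out : List Int) : Decidable (Spec_solution pegs out) := by unfold Spec_solution; infer_instance

-- ===== CLAIM (what is proved, stated in full; the proofs are below) =====
def Claim_equal_solution : Prop := ∀ (pegs : List Int), Dom_solution pegs → Pre_solution pegs → Spec_solution pegs (solution pegs)

-- ===== LEMMAS AND PROOFS =====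

-- the list of gaps between consecutive pegs
def gapsOf (pegs : List Int) : List Int :=
  (pegs.zip pegs.tail).map (fun p => p.2 - p.1)

-- sum of the odd-position gaps (what A's even-index peg loop accumulates)
def oddSum : List Int → Int
  | [] => 0
  | [_] => 0
  | _ :: b :: t => b + oddSum t

-- alternating sum of the gaps
def altSum : List Int → Int
  | [] => 0
  | a :: t => a - altSum t

-- alternating prefix sum of the first i gaps (what B tabulates in alts)
def altPre (g : List Int) : Nat → Int
  | 0 => 0
  | i + 1 => altPre g i + (if i % 2 = 0 then g.getD i 0 else -(g.getD i 0))

-- numerator of radius i scaled by den, in closed form (what B's per-index test uses)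
def badVal (g : List Int) (den num : Int) (i : Nat) : Int :=
  if i % 2 = 0 then num - den * altPre g i else den * altPre g i - num

-- one step of A's verify loop, over the gap value
def stepE (den : Int) (st : Except (List Int) Int) (g : Int) : Except (List Int) Int :=
  match st with
  | Except.error r => Except.error r
  | Except.ok cur => if cur < den then Except.error ([-1, -1] : List Int)
                     else Except.ok (g * den - cur)

theorem gapsOf_cons (a b : Int) (t : List Int) :
    gapsOf (a :: b :: t) = (b - a) :: gapsOf (b :: t) := by
  simp [gapsOf]

theorem length_gapsOf (pegs : List Int) : (gapsOf pegs).length = pegs.length - 1 := by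
  simp [gapsOf, List.length_zip]

theorem altSum_eq (l : List Int) : altSum l = l.sum - 2 * oddSum l := by
  induction l using oddSum.induct with
  | case1 => simp [altSum, oddSum]
  | case2 a => simp [altSum, oddSum]
  | case3 a b t ih =>
      simp only [altSum, oddSum, ih, List.sum_cons]
      ring

theorem sum_gapsOf_aux (t : List Int) : ∀ a : Int,
    (gapsOf (a :: t)).sum = (a :: t).getLast (by simp) - a := by
  induction t with
  | nil => intro a; simp [gapsOf]
  | cons b t' ih =>
      intro a
      rw [gapsOf_cons, List.sum_cons, ih b,
          List.getLast_cons (by simp : (b :: t') ≠ [])]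
      ring

theorem sum_gapsOf (pegs : List Int) (h : pegs ≠ []) :
    (gapsOf pegs).sum = PySem.List.pyGetD pegs (-1) 0 - PySem.List.pyGetD pegs 0 0 := by
  match pegs with
  | a :: t =>
      rw [PySem.List.pyGetD_neg_one (a :: t) 0 h, PySem.List.pyGetD_zero_cons,
          sum_gapsOf_aux t a]

theorem getElem_gapsOf (pegs : List Int) (k : Nat) (hk : k < (gapsOf pegs).length) :
    (gapsOf pegs)[k] = pegs[k + 1]'(by have := length_gapsOf pegs; omega)
      - pegs[k]'(by have := length_gapsOf pegs; omega) := by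
  simp [gapsOf, List.getElem_zip, List.getElem_tail]

theorem pyGetD_gapsOf (pegs : List Int) (j : Int) (h0 : 0 ≤ j)
    (h1 : j < ((gapsOf pegs).length : Int)) :
    PySem.List.pyGetD (gapsOf pegs) j 0
      = PySem.List.pyGetD pegs (j + 1) 0 - PySem.List.pyGetD pegs j 0 := by
  have hg := length_gapsOf pegs
  rw [PySem.List.pyGetD_eq_getElem _ 0 h0 h1,
      PySem.List.pyGetD_eq_getElem pegs 0 (by omega) (by omega),
      PySem.List.pyGetD_eq_getElem pegs 0 (by omega) (by omega),
      getElem_gapsOf pegs j.toNat (by omega)]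
  congr 2
  omega

theorem oddSum_range (g : List Int) :
    ((List.range (g.length / 2)).map (fun k => g.getD (2 * k + 1) 0)).sum = oddSum g := by
  induction g using oddSum.induct with
  | case1 => simp [oddSum]
  | case2 a => simp [oddSum]
  | case3 a b t ih =>
      have hl : (a :: b :: t).length / 2 = t.length / 2 + 1 := by
        simp only [List.length_cons]; omega
      rw [hl, List.range_succ_eq_map]
      simp only [List.map_cons, List.map_map, List.sum_cons, oddSum]
      have hsh : ∀ k : Nat, (a :: b :: t).getD (2 * Nat.succ k + 1) 0 = t.getD (2 * k + 1) 0 := by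
        intro k
        have h1 : 2 * Nat.succ k + 1 = (2 * k + 1) + 1 + 1 := by omega
        rw [h1, List.getD_cons_succ, List.getD_cons_succ]
      simp only [Function.comp_def, hsh]
      simpa [List.getD_eq_getElem?_getD] using ih

theorem evenLoop_eq (pegs : List Int) :
    (PySem.List.pyRange 2 (pegs.length : Int) 2).foldl
      (fun s i => s + (PySem.List.pyGetD pegs i 0 - PySem.List.pyGetD pegs (i - 1) 0)) 0
      = oddSum (gapsOf pegs) := by
  rw [PySem.List.pyRange_of_pos 2 (pegs.length : Int) (by norm_num),
      PySem.List.foldl_add, List.map_map, zero_add]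
  have hg := length_gapsOf pegs
  have hm : (if (2 : Int) < (pegs.length : Int)
        then (((pegs.length : Int) - 2 + 2 - 1) / 2).toNat else 0)
      = (gapsOf pegs).length / 2 := by
    split <;> omega
  rw [hm, ← oddSum_range (gapsOf pegs)]
  congr 1
  apply List.map_congr_left
  intro k hk
  have hk' : k < (gapsOf pegs).length / 2 := List.mem_range.mp hk
  have hidx : (2 * k + 1 : Nat) < (gapsOf pegs).length := by omega
  have h := pyGetD_gapsOf pegs ((2 * k + 1 : Nat) : Int) (by positivity) (by exact_mod_cast hidx)
  simp only [Function.comp_def]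
  have e1 : ((2 : Int) + 2 * (k : Int)) = ((2 * k + 1 : Nat) : Int) + 1 := by push_cast; ring
  have e2 : ((2 : Int) + 2 * (k : Int)) - 1 = ((2 * k + 1 : Nat) : Int) := by push_cast; ring
  rw [e2, e1, ← h, PySem.List.pyGetD_natCast]

theorem verify_eq (pegs : List Int) (h : pegs ≠ []) (num den : Int) :
    verify pegs [num, den] =
      (match (gapsOf pegs).foldl (stepE den) (Except.ok num) with
        | Except.error r => r
        | Except.ok _ =>
            if PySem.Int.mod num den == 0 then [PySem.Int.floordiv num den, 1]
            else [num, den]) := by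
  have hg := length_gapsOf pegs
  have hlen : ((pegs.length : Int) - 1) = ((gapsOf pegs).length : Int) := by
    have : pegs.length ≠ 0 := fun h0 => h (List.eq_nil_of_length_eq_zero h0)
    omega
  unfold verify
  simp only [PySem.List.pyGetD_zero_cons, hlen]
  have hr1 : PySem.List.pyGetD [num, den] 1 0 = den := by
    rfl
  rw [hr1]
  have hcong := PySem.List.foldl_congr_mem (PySem.List.pyRange 0 ((gapsOf pegs).length : Int))
    (fun st i => match st with
      | Except.error r => Except.error r
      | Except.ok numerator =>
        if numerator < den then Except.error pvFALSE
        else Except.ok ((PySem.List.pyGetD pegs (i + 1) 0 - PySem.List.pyGetD pegs i 0) * den - numerator))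
    (fun st i => match st with
      | Except.error r => Except.error r
      | Except.ok numerator =>
        if numerator < den then Except.error pvFALSE
        else Except.ok (PySem.List.pyGetD (gapsOf pegs) i 0 * den - numerator))
    (Except.ok num) ?side
  case side =>
    intro acc x hx
    have hb := PySem.List.mem_pyRange_one.mp hx
    cases acc with
    | error r => rfl
    | ok numerator => simp only [pyGetD_gapsOf pegs x hb.1 hb.2]
  rw [hcong, PySem.List.foldl_pyRange_zero_pyGetD' (gapsOf pegs) 0
      (fun st gv => match st with
        | Except.error r => Except.error r
        | Except.ok numerator =>
          if numerator < den then Except.error pvFALSE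
          else Except.ok (gv * den - numerator)) (Except.ok num)]
  have hfun : (fun (st : Except (List Int) Int) (gv : Int) => match st with
        | Except.error r => Except.error r
        | Except.ok numerator =>
          if numerator < den then Except.error pvFALSE
          else Except.ok (gv * den - numerator)) = stepE den := by
    funext st gv
    cases st <;> simp [stepE, pvFALSE]
  rw [hfun]

theorem mod2_natCast (j : Nat) : PySem.Int.mod (j : Int) 2 = ((j % 2 : Nat) : Int) := by
  exact_mod_cast PySem.Int.mod_natCast j 2

theorem altPre_cons (a : Int) (t : List Int) : ∀ i : Nat,
    altPre (a :: t) (i + 1) = a - altPre t i := by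
  intro i
  induction i with
  | zero => simp [altPre]
  | succ i ih =>
      show altPre (a :: t) (i + 1) + _ = _
      rw [ih]
      show a - altPre t i + (if (i + 1) % 2 = 0 then (a :: t).getD (i + 1) 0
            else -((a :: t).getD (i + 1) 0))
        = a - (altPre t i + (if i % 2 = 0 then t.getD i 0 else -(t.getD i 0)))
      rw [List.getD_cons_succ]
      rcases Nat.even_or_odd i with he | ho
      · have h1 : i % 2 = 0 := Nat.even_iff.mp he
        have h2 : (i + 1) % 2 ≠ 0 := by omega
        rw [if_pos h1, if_neg h2]; ring
      · have h1 : i % 2 ≠ 0 := by have := Nat.odd_iff.mp ho; omega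
        have h2 : (i + 1) % 2 = 0 := by have := Nat.odd_iff.mp ho; omega
        rw [if_neg h1, if_pos h2]; ring

theorem altPre_len (g : List Int) : altPre g g.length = altSum g := by
  induction g with
  | nil => rfl
  | cons a t ih => rw [List.length_cons, altPre_cons, ih]; rfl

theorem badVal_shift (a : Int) (t : List Int) (den num : Int) (i : Nat) :
    badVal (a :: t) den num (i + 1) = badVal t den (a * den - num) i := by
  unfold badVal
  rw [altPre_cons]
  rcases Nat.even_or_odd i with he | ho
  · have h1 : i % 2 = 0 := Nat.even_iff.mp he
    have h2 : (i + 1) % 2 ≠ 0 := by omega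
    rw [if_pos h1, if_neg h2]; ring
  · have h1 : i % 2 ≠ 0 := by have := Nat.odd_iff.mp ho; omega
    have h2 : (i + 1) % 2 = 0 := by have := Nat.odd_iff.mp ho; omega
    rw [if_neg h1, if_pos h2]; ring

theorem stepE_error (den : Int) (t : List Int) (r : List Int) :
    t.foldl (stepE den) (Except.error r) = Except.error r := by
  induction t with
  | nil => rfl
  | cons a t ih => simpa [stepE] using ih

theorem foldChar (den : Int) : ∀ (g : List Int) (num : Int),
    g.foldl (stepE den) (Except.ok num)
      = if (List.range g.length).any (fun i => decide (badVal g den num i < den))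
        then Except.error [-1, -1]
        else Except.ok (g.foldl (fun c gg => gg * den - c) num) := by
  intro g
  induction g with
  | nil => intro num; simp
  | cons a t ih =>
      intro num
      have hb0 : badVal (a :: t) den num 0 = num := by simp [badVal, altPre]
      by_cases hnum : num < den
      · rw [List.foldl_cons]
        rw [show stepE den (Except.ok num) a = Except.error [-1, -1] by
              simp [stepE, hnum]]
        rw [stepE_error den t _,
            if_pos (List.any_eq_true.mpr ⟨0, by simp, by simp [hb0, hnum]⟩)]
      · rw [List.foldl_cons]
        rw [show stepE den (Except.ok num) a = Except.ok (a * den - num) by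
              simp [stepE, hnum]]
        rw [ih (a * den - num)]
        have hany : ((List.range (a :: t).length).any
              (fun i => decide (badVal (a :: t) den num i < den)))
            = ((List.range t.length).any
              (fun i => decide (badVal t den (a * den - num) i < den))) := by
          rw [List.length_cons, List.range_succ_eq_map, List.any_cons, List.any_map]
          have h0 : decide (badVal (a :: t) den num 0 < den) = false := by
            rw [hb0]; simp only [decide_eq_false_iff_not]; omega
          rw [h0, Bool.false_or]
          apply PySem.List.any_congr_mem
          intro x _
          simp only [Function.comp_def, Nat.succ_eq_add_one, badVal_shift]
        rw [hany, List.foldl_cons]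

theorem alt_fold (pegs : List Int) : ∀ m : Nat, m ≤ (gapsOf pegs).length →
    (PySem.List.pyRange 0 (m : Int) 1).foldl
      (fun (p : List Int × Int) j =>
        let g := PySem.List.pyGetD pegs (j + 1) 0 - PySem.List.pyGetD pegs j 0
        let acc := p.2 + (if PySem.Int.mod j 2 == 0 then g else -g)
        (p.1 ++ [acc], acc)) ([0], 0)
    = ((List.range (m + 1)).map (altPre (gapsOf pegs)), altPre (gapsOf pegs) m) := by
  intro m
  induction m with
  | zero =>
      intro _
      rw [show ((0 : Nat) : Int) = 0 by rfl, PySem.List.pyRange_one_eq_nil (le_refl 0)]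
      simp [altPre]
  | succ m ih =>
      intro hm
      have hm' : m ≤ (gapsOf pegs).length := by omega
      have hcast : ((m + 1 : Nat) : Int) = (m : Int) + 1 := by push_cast; ring
      rw [hcast, PySem.List.pyRange_one_succ_right (by positivity), List.foldl_append,
          ih hm', List.foldl_cons, List.foldl_nil]
      have hgap : PySem.List.pyGetD pegs ((m : Int) + 1) 0 - PySem.List.pyGetD pegs (m : Int) 0
          = (gapsOf pegs).getD m 0 := by
        rw [← pyGetD_gapsOf pegs (m : Int) (by positivity) (by exact_mod_cast hm),
            PySem.List.pyGetD_natCast]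
      have hif : (if PySem.Int.mod (m : Int) 2 == 0
            then (gapsOf pegs).getD m 0 else -((gapsOf pegs).getD m 0))
          = (if m % 2 = 0 then (gapsOf pegs).getD m 0 else -((gapsOf pegs).getD m 0)) := by
        rw [mod2_natCast]
        by_cases hp : m % 2 = 0
        · rw [hp]; norm_num
        · have hp1 : m % 2 = 1 := by omega
          rw [hp1]; norm_num
      simp only [hgap, hif]
      rw [Prod.mk.injEq]
      refine ⟨?_, rfl⟩
      rw [List.range_succ (n := m + 1), List.map_append, List.map_cons, List.map_nil]
      rfl

-- the common shape both ports reduce to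
def midDen (pegs : List Int) : Int := if pegs.length % 2 == 1 then 1 else 3
def midNum (pegs : List Int) : Int := 2 * altSum (gapsOf pegs)
def midForm (pegs : List Int) : List Int :=
  if midNum pegs < midDen pegs then [-1, -1]
  else if (List.range (gapsOf pegs).length).any
      (fun i => decide (badVal (gapsOf pegs) (midDen pegs) (midNum pegs) i < midDen pegs))
    then [-1, -1]
  else if PySem.Int.mod (midNum pegs) (midDen pegs) == 0
    then [PySem.Int.floordiv (midNum pegs) (midDen pegs), 1]
  else [midNum pegs, midDen pegs]

theorem solution_eq_mid (pegs : List Int) (h : pegs ≠ []) :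
    solution pegs = midForm pegs := by
  simp only [solution, evenLoop_eq]
  have hnum : (PySem.List.pyGetD pegs (-1) 0 - PySem.List.pyGetD pegs 0 0
        - oddSum (gapsOf pegs) * 2) * 2 = 2 * altSum (gapsOf pegs) := by
    rw [altSum_eq, sum_gapsOf pegs h]; ring
  rw [hnum, verify_eq pegs h, foldChar]
  unfold midForm midNum midDen
  by_cases h1 : 2 * altSum (gapsOf pegs) < (if pegs.length % 2 == 1 then (1 : Int) else 3)
  · rw [if_pos h1, if_pos h1]; rfl
  · rw [if_neg h1, if_neg h1]
    by_cases h2 : ((List.range (gapsOf pegs).length).any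
        (fun i => decide (badVal (gapsOf pegs) (if pegs.length % 2 == 1 then (1 : Int) else 3)
          (2 * altSum (gapsOf pegs)) i < (if pegs.length % 2 == 1 then (1 : Int) else 3)))) = true
    · rw [if_pos h2, if_pos h2]
    · rw [if_neg h2, if_neg h2]

theorem solution_alt_eq_mid (pegs : List Int) (h : pegs ≠ []) :
    solution_alt pegs = midForm pegs := by
  have hg := length_gapsOf pegs
  have hp : pegs.length ≠ 0 := fun h0 => h (List.eq_nil_of_length_eq_zero h0)
  have hlen : (pegs.length : Int) - 1 = ((gapsOf pegs).length : Int) := by omega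
  simp only [solution_alt, hlen]
  rw [alt_fold pegs (gapsOf pegs).length (le_refl _)]
  simp only [altPre_len]
  have hany : (PySem.List.pyRange 0 ((gapsOf pegs).length : Int) 1).any
      (fun i => decide ((if PySem.Int.mod i 2 == 0
          then 2 * altSum (gapsOf pegs) - (if pegs.length % 2 == 1 then (1 : Int) else 3)
            * PySem.List.pyGetD ((List.range ((gapsOf pegs).length + 1)).map (altPre (gapsOf pegs))) i 0
          else (if pegs.length % 2 == 1 then (1 : Int) else 3)
            * PySem.List.pyGetD ((List.range ((gapsOf pegs).length + 1)).map (altPre (gapsOf pegs))) i 0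
            - 2 * altSum (gapsOf pegs))
        < (if pegs.length % 2 == 1 then (1 : Int) else 3)))
      = (List.range (gapsOf pegs).length).any
      (fun i => decide (badVal (gapsOf pegs) (if pegs.length % 2 == 1 then (1 : Int) else 3)
          (2 * altSum (gapsOf pegs)) i < (if pegs.length % 2 == 1 then (1 : Int) else 3)))
        := by
    rw [PySem.List.pyRange_zero_natCast, List.any_map]
    apply PySem.List.any_congr_mem
    intro j hj
    have hjlt : j < (gapsOf pegs).length := List.mem_range.mp hj
    simp only [Function.comp_def, PySem.List.pyGetD_natCast,
      PySem.List.getD_map_range (altPre (gapsOf pegs)) ((gapsOf pegs).length + 1) j 0 (by omega)]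
    unfold badVal
    by_cases hp2 : j % 2 = 0
    · have hd : (2 : Int) ∣ (j : Int) := by omega
      simp [hp2, hd]
    · have hp1 : j % 2 = 1 := by omega
      have hd : ¬ (2 : Int) ∣ (j : Int) := by omega
      simp [hp1, hd]
  rw [hany]
  unfold midForm midNum midDen
  rfl

-- ===== VERDICT (by name: the statement is the Claim_ definition above) =====
theorem solution_spec : Claim_equal_solution := by
  intro pegs _ hpre
  unfold Spec_solution
  rw [solution_eq_mid pegs hpre, solution_alt_eq_mid pegs hpre]
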